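-- pv_equiv track=rewrite | github.com/vakaflow-ai/vakaflow | backend/app/services/vendor_matching_service.py | _extract_vendors_from_description
-- ===== SOURCE A (Python) =====
-- from typing import List, Dict, Any, Optional, Tuple
--
-- def _extract_vendors_from_description(description: str, vendor_names: List[str]) -> List[str]:
--     """
--     Extract vendor names from CVE description that match known vendors
--
--     Args:
--         description: CVE description text
--         vendor_names: List of vendor names to search for
--
--     Returns:
--         List of matched vendor names
--     """
--     if not description or not vendor_names:
--         return []
--
--     found_vendors = []
--     desc_lower = description.lower()
--
--     for vendor_name in vendor_names:
--         if not vendor_name: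
--             continue
--
--         vendor_lower = vendor_name.lower()
--         # Check for exact match (case-insensitive)
--         if vendor_lower in desc_lower:
--             # Check context to ensure it's actually referring to the vendor
--             pos = desc_lower.find(vendor_lower)
--             context_start = max(0, pos - 30)
--             context_end = min(len(desc_lower), pos + len(vendor_lower) + 30)
--             context = desc_lower[context_start:context_end]
--
--             # If vendor name appears in meaningful context
--             if any(keyword in context for keyword in ["vendor", "company", "software", "product", "application", "system", "platform", "in", "from", "by"]):
--                 if vendor_name not in found_vendors:
--                     found_vendors.append(vendor_name)
--
--         # Also check for variations (without spaces, with different separators)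
--         vendor_variations = [
--             vendor_lower.replace(" ", ""),
--             vendor_lower.replace(" ", "-"),
--             vendor_lower.replace(" ", "_"),
--         ]
--         for variation in vendor_variations:
--             if variation and len(variation) > 2 and variation in desc_lower:
--                 if vendor_name not in found_vendors:
--                     found_vendors.append(vendor_name)
--                 break
--
--     return found_vendors
-- ===== SOURCE B (Python) =====
-- from typing import List
--
-- _KEYWORDS = ["vendor", "company", "software", "product", "application",
--              "system", "platform", "in", "from", "by"]
--
--
-- def _keyword_spans(d):
--     """Positional index of the description: every (start, end) span of a keyword occurrence."""
--     return [(q, q + len(k)) for k in _KEYWORDS for q in range(len(d)) if d.startswith(k, q)]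
--
--
-- def _matches(d, spans, v):
--     vl = v.lower()
--     pos = d.find(vl)
--     if pos >= 0 and any(pos - 30 <= q and e <= pos + len(vl) + 30 for q, e in spans):
--         return True
--     return any(len(w) > 2 and w in d
--                for w in (vl.replace(" ", ""), vl.replace(" ", "-"), vl.replace(" ", "_")))
--
--
-- def _extract_vendors_from_description(description: str, vendor_names: List[str]) -> List[str]:
--     d = description.lower()
--     spans = _keyword_spans(d)
--     return list(dict.fromkeys(v for v in vendor_names if v and _matches(d, spans, v)))
-- ===== Notes on version B (the rewrite author's own statement) =====
-- stated objective: alternative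
-- what changed: B builds a positional index of every keyword occurrence in the description once, then each vendor's context test is an interval-containment check against that index instead of slicing a context window and re-scanning it for all 10 keywords per vendor, and the ordered result is a filter + dict.fromkeys dedup instead of A's accumulating loop with membership tests and a break-driven variation loop.
import Mathlib
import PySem

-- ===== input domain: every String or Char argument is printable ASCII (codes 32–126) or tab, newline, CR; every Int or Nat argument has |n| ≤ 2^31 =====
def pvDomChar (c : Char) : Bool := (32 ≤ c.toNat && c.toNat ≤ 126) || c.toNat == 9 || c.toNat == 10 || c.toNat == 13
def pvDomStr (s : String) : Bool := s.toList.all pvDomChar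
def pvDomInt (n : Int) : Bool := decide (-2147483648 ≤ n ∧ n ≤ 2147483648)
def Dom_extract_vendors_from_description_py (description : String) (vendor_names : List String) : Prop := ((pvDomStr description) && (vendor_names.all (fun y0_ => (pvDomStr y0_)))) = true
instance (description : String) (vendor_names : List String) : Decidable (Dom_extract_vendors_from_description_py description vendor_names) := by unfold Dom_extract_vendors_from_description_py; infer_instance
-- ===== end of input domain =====

-- B replaces A's per-vendor context scan (for every matched vendor, slice a context window and
-- re-scan it for each of the 10 keywords) by a positional index of ALL keyword occurrences in the
-- description, built ONCE; each vendor's context test becomes an interval-containment check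
-- against that index, and the ordered result is a filter + dedup instead of A's accumulating
-- loop with membership tests; objective: alternative.

-- ===== PORT A =====
def pvKeywords : List String :=
  ["vendor", "company", "software", "product", "application", "system", "platform", "in", "from", "by"]

-- the 'for variation in vendor_variations: … break' loop of A
def pvVarLoop (d v : String) (ws : List String) (acc : List String) : List String :=
  match ws with
  | [] => acc
  | w :: ws' =>
      if w ≠ "" ∧ 2 < PySem.Str.len w ∧ PySem.Str.isIn w d = true then
        (if v ∈ acc then acc else acc ++ [v])
      else pvVarLoop d v ws' acc

-- the body of A's 'for vendor_name in vendor_names' loop (d = description.lower())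
def pvLoopBody (d : String) (acc : List String) (v : String) : List String :=
  if v = "" then acc
  else
    let vl := PySem.Str.lower v
    let acc1 :=
      if PySem.Str.isIn vl d then
        let pos := PySem.Str.find d vl
        let context := PySem.Str.slice d (some (max 0 (pos - 30)))
          (some (min (PySem.Str.len d) (pos + PySem.Str.len vl + 30)))
        if pvKeywords.any (fun k => PySem.Str.isIn k context) then
          (if v ∈ acc then acc else acc ++ [v])
        else acc
      else acc
    pvVarLoop d v
      [PySem.Str.replace vl " " "", PySem.Str.replace vl " " "-", PySem.Str.replace vl " " "_"]
      acc1

def extract_vendors_from_description_py (description : String) (vendor_names : List String) : List String :=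
  if description = "" ∨ vendor_names = [] then []
  else vendor_names.foldl (pvLoopBody (PySem.Str.lower description)) []

-- ===== PORT B =====
-- positional index: [(q, q + len(k)) for k in _KEYWORDS for q in range(len(d)) if d.startswith(k, q)]
-- ('d.startswith(k, q)' for 0 ≤ q < len(d) is ported by hand as the prefix test on d[q:]; exact there)
def pvSpans (d : String) : List (Int × Int) :=
  pvKeywords.flatMap (fun k =>
    (PySem.List.pyRange 0 (PySem.Str.len d) 1).filterMap (fun q =>
      if PySem.Chars.startswith (d.toList.drop q.toNat) k.toList then
        some (q, q + PySem.Str.len k)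
      else none))

def pvMatchesB (d : String) (spans : List (Int × Int)) (v : String) : Bool :=
  let vl := PySem.Str.lower v
  let pos := PySem.Str.find d vl
  (decide (0 ≤ pos) && spans.any (fun qe =>
      decide (pos - 30 ≤ qe.1) && decide (qe.2 ≤ pos + PySem.Str.len vl + 30))) ||
  [PySem.Str.replace vl " " "", PySem.Str.replace vl " " "-", PySem.Str.replace vl " " "_"].any
    (fun w => decide (2 < PySem.Str.len w) && PySem.Str.isIn w d)

def extract_vendors_from_description_py_alt (description : String) (vendor_names : List String) : List String :=
  let d := PySem.Str.lower description
  let spans := pvSpans d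
  PySem.List.dedup (vendor_names.filter (fun v => decide (v ≠ "") && pvMatchesB d spans v))

-- ===== PRECONDITION & SPEC =====
def Spec_extract_vendors_from_description_py (description : String) (vendor_names : List String) (out : List String) : Prop := out = extract_vendors_from_description_py_alt description vendor_names
instance (description : String) (vendor_names : List String) (out : List String) : Decidable (Spec_extract_vendors_from_description_py description vendor_names out) := by unfold Spec_extract_vendors_from_description_py; infer_instance

-- ===== CLAIM (what is proved, stated in full; the proofs are below) =====
def Claim_equal_extract_vendors_from_description_py : Prop := ∀ (description : String) (vendor_names : List String), Dom_extract_vendors_from_description_py description vendor_names → Spec_extract_vendors_from_description_py description vendor_names (extract_vendors_from_description_py description vendor_names)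

-- ===== LEMMAS AND PROOFS =====

-- A's per-variation test equals B's (a string of length > 2 is nonempty)
theorem pv_cond_iff (d w : String) :
    (w ≠ "" ∧ 2 < PySem.Str.len w ∧ PySem.Str.isIn w d = true) ↔
      (decide (2 < PySem.Str.len w) && PySem.Str.isIn w d) = true := by
  constructor
  · rintro ⟨_, h2, h3⟩
    simp only [Bool.and_eq_true, decide_eq_true_eq]
    exact ⟨h2, h3⟩
  · intro h
    simp only [Bool.and_eq_true, decide_eq_true_eq] at h
    refine ⟨?_, h.1, h.2⟩
    rintro rfl
    exact absurd h.1 (by decide)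

theorem pv_varLoop_eq (d v : String) (ws acc : List String) :
    pvVarLoop d v ws acc =
      if ws.any (fun w => decide (2 < PySem.Str.len w) && PySem.Str.isIn w d) then
        (if v ∈ acc then acc else acc ++ [v])
      else acc := by
  induction ws with
  | nil => simp [pvVarLoop]
  | cons w ws ih =>
      by_cases hb : (decide (2 < PySem.Str.len w) && PySem.Str.isIn w d) = true
      · rw [pvVarLoop, if_pos ((pv_cond_iff d w).mpr hb)]
        simp only [List.any_cons, hb, Bool.true_or, if_true]
      · rw [pvVarLoop, if_neg (fun hc => hb ((pv_cond_iff d w).mp hc)), ih]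
        simp only [List.any_cons, Bool.eq_false_iff.mpr hb, Bool.false_or]

-- combining A's two conditional appends equals one Set.add under the disjunction
theorem pv_combine (v : String) (acc : List String) (c b : Bool) :
    (if b then
       (if v ∈ (if c then (if v ∈ acc then acc else acc ++ [v]) else acc) then
          (if c then (if v ∈ acc then acc else acc ++ [v]) else acc)
        else (if c then (if v ∈ acc then acc else acc ++ [v]) else acc) ++ [v])
     else (if c then (if v ∈ acc then acc else acc ++ [v]) else acc)) =
    (if (c || b) then PySem.Set.add acc v else acc) := by
  cases c <;> cases b <;> by_cases hm : v ∈ acc <;>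
    simp [PySem.Set.add, hm, List.mem_append]

-- an infix is a prefix of some drop
theorem pv_infix_iff_drop (k l : List Char) : k <:+: l ↔ ∃ j, k <+: l.drop j := by
  constructor
  · rintro ⟨s, t, rfl⟩
    exact ⟨s.length, by simp⟩
  · rintro ⟨j, h⟩
    exact h.isInfix.trans (List.drop_suffix j l).isInfix

-- occurrences of a nonempty pattern in a window d[a:b] are occurrences in d inside [a, b)
theorem pv_infix_window (dl k : List Char) (hk : k ≠ []) (a b : Nat) :
    k <:+: (dl.drop a).take (b - a) ↔
      ∃ q : Nat, a ≤ q ∧ q + k.length ≤ b ∧ k <+: dl.drop q := by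
  have hkpos : 0 < k.length := List.length_pos_of_ne_nil hk
  rw [pv_infix_iff_drop]
  constructor
  · rintro ⟨j, hj⟩
    rw [List.drop_take, List.drop_drop, List.prefix_take_iff] at hj
    exact ⟨a + j, by omega, by omega, hj.1⟩
  · rintro ⟨q, h1, h2, h3⟩
    refine ⟨q - a, ?_⟩
    rw [List.drop_take, List.drop_drop, List.prefix_take_iff]
    have hq : a + (q - a) = q := by omega
    rw [hq]
    have hlen := h3.length_le
    rw [List.length_drop] at hlen
    exact ⟨h3, by omega⟩

-- membership in the positional index
theorem pv_mem_spans (d : String) (qe : Int × Int) :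
    qe ∈ pvSpans d ↔ ∃ k ∈ pvKeywords, ∃ q : Nat, q < d.toList.length ∧
      k.toList <+: d.toList.drop q ∧ qe = ((q : Int), (q : Int) + (k.toList.length : Int)) := by
  simp only [pvSpans, List.mem_flatMap, List.mem_filterMap, PySem.List.mem_pyRange_one,
    Option.ite_none_right_eq_some, Option.some.injEq, PySem.Chars.startswith_iff,
    PySem.Str.len_eq]
  constructor
  · rintro ⟨k, hk, q, ⟨h0, hq⟩, hsw, heq⟩
    subst heq
    refine ⟨k, hk, q.toNat, by omega, hsw, ?_⟩
    rw [Int.toNat_of_nonneg h0]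
  · rintro ⟨k, hk, q, hq, hsw, rfl⟩
    exact ⟨k, hk, (q : Int), ⟨by omega, by omega⟩, by simpa using hsw, rfl⟩

-- per-keyword: keyword occurs in A's context slice ↔ some occurrence fits the window
theorem pv_isIn_window (d : String) (k : List Char) (hk : k ≠ []) (pos L : Int)
    (h0 : 0 ≤ pos) (hL : 0 ≤ L) :
    PySem.Chars.isIn k (PySem.List.slice d.toList (some (max 0 (pos - 30)))
        (some (min ((d.toList.length : Int)) (pos + L + 30)))) = true ↔
      ∃ q : Nat, q < d.toList.length ∧ k <+: d.toList.drop q ∧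
        pos - 30 ≤ (q : Int) ∧ (q : Int) + (k.length : Int) ≤ pos + L + 30 := by
  have hkpos : 0 < k.length := List.length_pos_of_ne_nil hk
  have ha : (0:Int) ≤ max 0 (pos - 30) := le_max_left _ _
  have hb : (0:Int) ≤ min ((d.toList.length : Int)) (pos + L + 30) := by
    have := Int.natCast_nonneg d.toList.length
    omega
  rw [PySem.Chars.isIn_iff_infix, PySem.List.slice_toNat _ ha hb, pv_infix_window _ _ hk]
  constructor
  · rintro ⟨q, h1, h2, h3⟩
    have hlen := h3.length_le
    rw [List.length_drop] at hlen
    refine ⟨q, by omega, h3, by omega, by omega⟩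
  · rintro ⟨q, h1, h2, h3, h4⟩
    have hlen := h2.length_le
    rw [List.length_drop] at hlen
    exact ⟨q, by omega, by omega, h2⟩

-- the interval check against the index equals A's keyword scan over the context slice
theorem pv_any_spans (d : String) (pos L : Int) (h0 : 0 ≤ pos) (hL : 0 ≤ L) :
    ((pvSpans d).any (fun qe =>
        decide (pos - 30 ≤ qe.1) && decide (qe.2 ≤ pos + L + 30))) =
      (pvKeywords.any (fun k => PySem.Str.isIn k (PySem.Str.slice d (some (max 0 (pos - 30)))
        (some (min (PySem.Str.len d) (pos + L + 30)))))) := by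
  have hknil : ∀ k ∈ pvKeywords, k.toList ≠ [] := by decide
  rw [Bool.eq_iff_iff]
  simp only [List.any_eq_true, Bool.and_eq_true, decide_eq_true_eq]
  constructor
  · rintro ⟨qe, hmem, hlo, hhi⟩
    rcases (pv_mem_spans d qe).mp hmem with ⟨k, hk, q, hq, hpre, rfl⟩
    refine ⟨k, hk, ?_⟩
    rw [PySem.Str.isIn_eq, PySem.Str.toList_slice, PySem.Chars.slice_eq_listSlice,
      PySem.Str.len_eq]
    exact (pv_isIn_window d k.toList (hknil k hk) pos L h0 hL).mpr
      ⟨q, hq, hpre, by simpa using hlo, by simpa using hhi⟩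
  · rintro ⟨k, hk, hin⟩
    rw [PySem.Str.isIn_eq, PySem.Str.toList_slice, PySem.Chars.slice_eq_listSlice,
      PySem.Str.len_eq] at hin
    rcases (pv_isIn_window d k.toList (hknil k hk) pos L h0 hL).mp hin with
      ⟨q, hq, hpre, hlo, hhi⟩
    exact ⟨((q : Int), (q : Int) + (k.toList.length : Int)),
      (pv_mem_spans d _).mpr ⟨k, hk, q, hq, hpre, rfl⟩, hlo, hhi⟩

-- B's index-based exact test equals A's substring + context-keyword test
theorem pv_exactHit_eq (d v : String) :
    (decide (0 ≤ PySem.Str.find d (PySem.Str.lower v)) &&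
      (pvSpans d).any (fun qe =>
        decide (PySem.Str.find d (PySem.Str.lower v) - 30 ≤ qe.1) &&
        decide (qe.2 ≤ PySem.Str.find d (PySem.Str.lower v) + PySem.Str.len (PySem.Str.lower v) + 30))) =
    (PySem.Str.isIn (PySem.Str.lower v) d &&
      pvKeywords.any (fun k => PySem.Str.isIn k (PySem.Str.slice d
        (some (max 0 (PySem.Str.find d (PySem.Str.lower v) - 30)))
        (some (min (PySem.Str.len d)
          (PySem.Str.find d (PySem.Str.lower v) + PySem.Str.len (PySem.Str.lower v) + 30)))))) := by
  have hL : (0:Int) ≤ PySem.Str.len (PySem.Str.lower v) := by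
    rw [PySem.Str.len_eq]; exact Int.natCast_nonneg _
  by_cases hE : PySem.Str.isIn (PySem.Str.lower v) d = true
  · have hpos : (0:Int) ≤ PySem.Str.find d (PySem.Str.lower v) := by
      rw [PySem.Str.find_eq]
      exact (PySem.Chars.find_nonneg_iff _ _).mpr
        ((PySem.Chars.isIn_iff_infix _ _).mp (by rwa [PySem.Str.isIn_eq] at hE))
    rw [hE, decide_eq_true hpos, Bool.true_and, Bool.true_and]
    exact pv_any_spans d _ _ hpos hL
  · have hneg : PySem.Str.find d (PySem.Str.lower v) = -1 := by
      rw [PySem.Str.find_eq]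
      exact (PySem.Chars.find_eq_neg_one_iff _ _).mpr
        ((PySem.Chars.isIn_eq_false_iff _ _).mp
          (by rw [← PySem.Str.isIn_eq]; exact Bool.eq_false_iff.mpr hE))
    rw [Bool.eq_false_iff.mpr hE, hneg, Bool.false_and]
    rw [decide_eq_false (by decide : ¬ ((0:Int) ≤ -1)), Bool.false_and]

-- no vendor matches the empty description
theorem pv_matchesB_empty (v : String) : pvMatchesB "" (pvSpans "") v = false := by
  have hsp : pvSpans "" = [] := by decide
  have hvar : ∀ w : String, (decide (2 < PySem.Str.len w) && PySem.Str.isIn w "") = false := by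
    intro w
    by_cases h2 : 2 < PySem.Str.len w
    · have hne : w.toList ≠ [] := by
        intro h
        rw [PySem.Str.len_eq, h] at h2
        exact absurd h2 (by decide)
      have : PySem.Str.isIn w "" = false := by
        rw [PySem.Str.isIn_eq, String.toList_empty]
        exact (PySem.Chars.isIn_eq_false_iff _ _).mpr
          (fun hinf => hne (List.eq_nil_of_infix_nil hinf))
      exact Bool.and_eq_false_imp.mpr (fun _ => this)
    · rw [decide_eq_false h2, Bool.false_and]
  simp only [pvMatchesB, hsp, List.any_nil, Bool.and_false, Bool.false_or]
  rw [List.any_eq_false]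
  intro w hw
  exact Bool.eq_false_iff.mp (hvar w)

-- A's loop body: add v to the result iff B's filter predicate holds
theorem pv_step_eq (d v : String) (acc : List String) :
    pvLoopBody d acc v =
      (if (decide (v ≠ "") && pvMatchesB d (pvSpans d) v) then PySem.Set.add acc v else acc) := by
  by_cases hv : v = ""
  · simp [pvLoopBody, hv]
  · simp only [pvLoopBody, pvMatchesB, if_neg hv, pv_varLoop_eq,
      decide_eq_true (show v ≠ "" from hv), Bool.true_and]
    rw [pv_exactHit_eq d v, ← ite_and]
    simp only [← Bool.and_eq_true]
    exact pv_combine v acc _ _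

-- ===== VERDICT (by name: the statement is the Claim_ definition above) =====
theorem extract_vendors_from_description_py_spec : Claim_equal_extract_vendors_from_description_py := by
  intro description vendor_names _
  unfold Spec_extract_vendors_from_description_py
  unfold extract_vendors_from_description_py
  show _ = PySem.List.dedup (vendor_names.filter (fun v =>
    decide (v ≠ "") && pvMatchesB (PySem.Str.lower description)
      (pvSpans (PySem.Str.lower description)) v))
  by_cases hg : description = "" ∨ vendor_names = []
  · rw [if_pos hg]
    rcases hg with hd | hvs
    · subst hd
      rw [show PySem.Str.lower "" = "" from by decide]
      rw [List.filter_eq_nil_iff.mpr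
        (fun v _ => by rw [pv_matchesB_empty v, Bool.and_false]; exact Bool.false_ne_true)]
      rfl
    · subst hvs
      rfl
  · rw [if_neg hg]
    have h1 : pvLoopBody (PySem.Str.lower description) =
        (fun acc v => if (decide (v ≠ "") && pvMatchesB (PySem.Str.lower description)
            (pvSpans (PySem.Str.lower description)) v) then PySem.Set.add acc v else acc) :=
      funext fun acc => funext fun v => pv_step_eq (PySem.Str.lower description) v acc
    rw [h1, PySem.List.foldl_if_eq_foldl_filter, ← PySem.Set.ofList_eq_foldl,
      ← PySem.List.dedup_eq_ofList]
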